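-- pv_equiv track=rewrite | github.com/gnatnib/minesweeperimp | bruteforce.py | SolveBackTrackMinesweeper
-- ===== SOURCE A (Python) =====
-- dx = [-1, 0, 1, -1, 0, 1, -1, 0, 1]
--
-- dy = [0, 0, 0, -1, -1, -1, 1, 1, 1]
--
-- def isValid(x, y, N, M):
--     return 0 <= x < N and 0 <= y < M
--
-- def canAssignMine(arr, x, y, N, M):
--     if not isValid(x, y, N, M):
--         return False
--     for i in range(9):
--         nx, ny = x + dx[i], y + dy[i]
--         if isValid(nx, ny, N, M) and arr[nx][ny] == 0:
--             return False
--     for i in range(9):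
--         nx, ny = x + dx[i], y + dy[i]
--         if isValid(nx, ny, N, M):
--             arr[nx][ny] -= 1
--     return True
--
-- def findUnvisited(visited, N, M):
--     for x in range(N):
--         for y in range(M):
--             if not visited[x][y]:
--                 return (x, y)
--     return None
--
-- def isVisitedandSatisfied(arr, visited, N, M):
--     for i in range(N):
--         for j in range(M):
--             if arr[i][j] != 0 or not visited[i][j]:
--                 return False
--     return True
--
-- def SolveBackTrackMinesweeper(grid, arr, visited, N, M):
--     if isVisitedandSatisfied(arr, visited, N, M):
--         return True
--     unvisited = findUnvisited(visited, N, M)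
--     if unvisited is None:
--         return False
--     x, y = unvisited
--     visited[x][y] = True
--     if canAssignMine(arr, x, y, N, M):
--         grid[x][y] = 'X'
--         if SolveBackTrackMinesweeper(grid, arr, visited, N, M):
--             return True
--         grid[x][y] = '-'
--         for i in range(9):
--             nx, ny = x + dx[i], y + dy[i]
--             if isValid(nx, ny, N, M):
--                 arr[nx][ny] += 1
--     if SolveBackTrackMinesweeper(grid, arr, visited, N, M):
--         return True
--     visited[x][y] = False
--     return False
-- ===== SOURCE B (Python) =====
-- def SolveBackTrackMinesweeper(grid, arr, visited, N, M):
--     # Iterative backtracking with an explicit stack of decision frames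
--     # (index of the mined cell, saved clue counts) instead of call recursion.
--     # Return-value equivalent to the recursive version; does not mutate its arguments.
--     cells = [(x, y) for x in range(N) for y in range(M) if not visited[x][y]]
--     a = [list(row[:max(M, 0)]) for row in arr[:max(N, 0)]]
--     stack = []
--     k = 0
--     while True:
--         while k < len(cells):
--             x, y = cells[k]
--             nb = [(x + u, y + v) for u in (-1, 0, 1) for v in (-1, 0, 1)
--                   if 0 <= x + u < N and 0 <= y + v < M]
--             if all(a[i][j] != 0 for i, j in nb):
--                 stack.append((k, [row[:] for row in a]))
--                 for i, j in nb:
--                     a[i][j] -= 1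
--             k += 1
--         if all(v == 0 for row in a for v in row):
--             return True
--         if not stack:
--             return False
--         k, a = stack.pop()
--         k += 1
-- ===== Notes on version B (the rewrite author's own statement) =====
-- stated objective: alternative
-- what changed: The recursive backtracking (re-scanning the whole board for satisfaction and for the next unvisited cell at every node, and undoing clue decrements cell by cell) is replaced by an iterative engine: the unvisited cells are listed once, and an explicit stack of decision frames (cell index, saved clue counts) drives the mine-first/empty-second search, restoring state on backtrack by popping a frame; B does not mutate its arguments.
-- outside the precondition, e.g. on SolveBackTrackMinesweeper([[]], [[1]], [[True, True]], 1, 2): A returns False, B returns False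
import Mathlib
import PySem

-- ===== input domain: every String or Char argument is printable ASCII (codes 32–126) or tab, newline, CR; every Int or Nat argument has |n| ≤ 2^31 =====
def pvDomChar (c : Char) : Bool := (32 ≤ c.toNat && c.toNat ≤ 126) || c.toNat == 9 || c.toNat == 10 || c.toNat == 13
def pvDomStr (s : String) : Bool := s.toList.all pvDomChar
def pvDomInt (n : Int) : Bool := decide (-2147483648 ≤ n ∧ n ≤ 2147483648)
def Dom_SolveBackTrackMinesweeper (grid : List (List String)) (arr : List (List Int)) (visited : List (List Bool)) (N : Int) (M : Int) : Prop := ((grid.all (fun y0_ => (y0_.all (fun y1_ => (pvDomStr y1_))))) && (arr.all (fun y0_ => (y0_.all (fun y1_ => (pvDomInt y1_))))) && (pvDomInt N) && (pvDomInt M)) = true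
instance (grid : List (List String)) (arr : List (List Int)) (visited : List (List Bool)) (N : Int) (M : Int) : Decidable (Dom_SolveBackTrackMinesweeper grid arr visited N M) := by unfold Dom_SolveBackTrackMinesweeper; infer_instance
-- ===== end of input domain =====

-- B replaces the recursive backtracking by an iterative engine over a precomputed unvisited-cell
-- list with an explicit stack of (index, saved counts) decision frames; A mutates grid/arr/visited
-- in place while B does not, and only the RETURN VALUE is proved equal here.
-- ===== PORT A =====
def pvDx : List Int := [-1, 0, 1, -1, 0, 1, -1, 0, 1]
def pvDy : List Int := [0, 0, 0, -1, -1, -1, 1, 1, 1]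

def pvIsValid (x y N M : Int) : Bool := decide (0 ≤ x) && decide (x < N) && decide (0 ≤ y) && decide (y < M)

def pvGet2I (a : List (List Int)) (x y : Int) : Int :=
  PySem.List.pyGetD (PySem.List.pyGetD a x []) y 0
def pvGet2B (v : List (List Bool)) (x y : Int) : Bool :=
  PySem.List.pyGetD (PySem.List.pyGetD v x []) y true
def pvSet2B (v : List (List Bool)) (x y : Int) (b : Bool) : List (List Bool) :=
  PySem.List.pySetD v x (PySem.List.pySetD (PySem.List.pyGetD v x []) y b)
def pvSet2S (g : List (List String)) (x y : Int) (s : String) : List (List String) :=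
  PySem.List.pySetD g x (PySem.List.pySetD (PySem.List.pyGetD g x []) y s)
-- a[x][y] += d  (in-range under Pre_; transliterates arr[nx][ny] -= 1 / += 1)
def pvAdd2 (a : List (List Int)) (x y d : Int) : List (List Int) :=
  PySem.List.pySetD a x (PySem.List.pySetD (PySem.List.pyGetD a x []) y (pvGet2I a x y + d))

def pvCanAssignMine (arr : List (List Int)) (x y N M : Int) : Bool × List (List Int) :=
  if !pvIsValid x y N M then (false, arr)
  else if (PySem.List.pyRange 0 9 1).all (fun i =>
      !(pvIsValid (x + PySem.List.pyGetD pvDx i 0) (y + PySem.List.pyGetD pvDy i 0) N M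
          && decide (pvGet2I arr (x + PySem.List.pyGetD pvDx i 0) (y + PySem.List.pyGetD pvDy i 0) = 0)))
  then (true, (PySem.List.pyRange 0 9 1).foldl (fun a i =>
      if pvIsValid (x + PySem.List.pyGetD pvDx i 0) (y + PySem.List.pyGetD pvDy i 0) N M
      then pvAdd2 a (x + PySem.List.pyGetD pvDx i 0) (y + PySem.List.pyGetD pvDy i 0) (-1)
      else a) arr)
  else (false, arr)

def pvFindUnvisited (visited : List (List Bool)) (N M : Int) : Option (Int × Int) :=
  (PySem.List.pyRange 0 N 1).findSome? (fun x =>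
    (PySem.List.pyRange 0 M 1).findSome? (fun y =>
      if !pvGet2B visited x y then some (x, y) else none))

def pvIsVisitedandSatisfied (arr : List (List Int)) (visited : List (List Bool)) (N M : Int) : Bool :=
  (PySem.List.pyRange 0 N 1).all (fun i => (PySem.List.pyRange 0 M 1).all (fun j =>
    !(decide (pvGet2I arr i j ≠ 0) || !pvGet2B visited i j)))

def pvUndoMine (arr : List (List Int)) (x y N M : Int) : List (List Int) :=
  (PySem.List.pyRange 0 9 1).foldl (fun a i =>
    if pvIsValid (x + PySem.List.pyGetD pvDx i 0) (y + PySem.List.pyGetD pvDy i 0) N M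
    then pvAdd2 a (x + PySem.List.pyGetD pvDx i 0) (y + PySem.List.pyGetD pvDy i 0) 1
    else a) arr

def pvSolveA : Nat → List (List String) → List (List Int) → List (List Bool) → Int → Int →
    Bool × List (List String) × List (List Int) × List (List Bool)
  | 0, g, a, v, _, _ => (false, g, a, v)
  | fuel+1, g, a, v, N, M =>
    if pvIsVisitedandSatisfied a v N M then (true, g, a, v)
    else match pvFindUnvisited v N M with
      | none => (false, g, a, v)
      | some (x, y) =>
        let v1 := pvSet2B v x y true
        match pvCanAssignMine a x y N M with
        | (true, a1) =>
          match pvSolveA fuel (pvSet2S g x y "X") a1 v1 N M with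
          | (true, g2, a2, v2) => (true, g2, a2, v2)
          | (false, g2, a2, v2) =>
            let g3 := pvSet2S g2 x y "-"
            let a3 := pvUndoMine a2 x y N M
            match pvSolveA fuel g3 a3 v2 N M with
            | (true, g4, a4, v4) => (true, g4, a4, v4)
            | (false, g4, a4, v4) => (false, g4, a4, pvSet2B v4 x y false)
        | (false, a1) =>
          match pvSolveA fuel g a1 v1 N M with
          | (true, g4, a4, v4) => (true, g4, a4, v4)
          | (false, g4, a4, v4) => (false, g4, a4, pvSet2B v4 x y false)

def SolveBackTrackMinesweeper (grid : List (List String)) (arr : List (List Int)) (visited : List (List Bool)) (N : Int) (M : Int) : Bool :=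
  (pvSolveA (N.toNat * M.toNat + 1) grid arr visited N M).1

-- ===== PORT B =====
def pvCellsB (visited : List (List Bool)) (N M : Int) : List (Int × Int) :=
  (PySem.List.pyRange 0 N 1).flatMap (fun x =>
    ((PySem.List.pyRange 0 M 1).filter (fun y => !pvGet2B visited x y)).map (fun y => (x, y)))

def pvCopyB (arr : List (List Int)) (N M : Int) : List (List Int) :=
  (PySem.List.slice arr none (some (max N 0))).map (fun r => PySem.List.slice r none (some (max M 0)))

def pvNbB (x y N M : Int) : List (Int × Int) :=
  ([-1, 0, 1] : List Int).flatMap (fun u => ([-1, 0, 1] : List Int).filterMap (fun v =>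
    if 0 ≤ x + u ∧ x + u < N ∧ 0 ≤ y + v ∧ y + v < M then some (x + u, y + v) else none))

def pvAllZeroList (a : List (List Int)) : Bool := a.all (fun row => row.all (fun z => decide (z = 0)))

-- inner `while k < len(cells)` loop: descend from index k, pushing a frame for each placed mine
def pvDescendB (N M : Int) : List ((Int × Int) × Nat) → List (List Int) → List (Nat × List (List Int)) →
    List (List Int) × List (Nat × List (List Int))
  | [], a, st => (a, st)
  | ((x, y), k) :: rest, a, st =>
    let nb := pvNbB x y N M
    if nb.all (fun p => decide (pvGet2I a p.1 p.2 ≠ 0)) then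
      pvDescendB N M rest (nb.foldl (fun acc p => pvAdd2 acc p.1 p.2 (-1)) a) ((k, a) :: st)
    else pvDescendB N M rest a st

-- outer loop; one unit of fuel per backtracking pop
def pvLoopB (N M : Int) (cells : List (Int × Int)) : Nat → Nat → List (List Int) → List (Nat × List (List Int)) → Bool
  | 0, _, _, _ => false
  | fuel+1, k, a, st =>
    match pvDescendB N M (cells.zipIdx.drop k) a st with
    | (a', st') =>
      if pvAllZeroList a' then true
      else match st' with
        | [] => false
        | (k', aSaved) :: rest => pvLoopB N M cells fuel (k' + 1) aSaved rest

def SolveBackTrackMinesweeper_alt (grid : List (List String)) (arr : List (List Int)) (visited : List (List Bool)) (N : Int) (M : Int) : Bool :=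
  let cells := pvCellsB visited N M
  pvLoopB N M cells (2 ^ cells.length + 1) 0 (pvCopyB arr N M) []



-- ===== PRECONDITION & SPEC =====
-- Pre_ admits all degenerate boards (N ≤ 0 or M ≤ 0, on which A returns True untouched) and,
-- for N, M > 0, requires grid/arr/visited to cover the full N×M window: on ragged input A reads
-- and writes cells lazily and either raises IndexError or returns early by accident of scan
-- order, while B always reads the whole window (see the cited excluded examples).
def Pre_SolveBackTrackMinesweeper (grid : List (List String)) (arr : List (List Int)) (visited : List (List Bool)) (N : Int) (M : Int) : Prop :=
  N ≤ 0 ∨ M ≤ 0 ∨ (N.toNat ≤ grid.length ∧ N.toNat ≤ arr.length ∧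
    N.toNat ≤ visited.length ∧ (∀ r ∈ grid.take N.toNat, M.toNat ≤ r.length) ∧
    (∀ r ∈ arr.take N.toNat, M.toNat ≤ r.length) ∧
    (∀ r ∈ visited.take N.toNat, M.toNat ≤ r.length))
instance (grid : List (List String)) (arr : List (List Int)) (visited : List (List Bool)) (N : Int) (M : Int) : Decidable (Pre_SolveBackTrackMinesweeper grid arr visited N M) := by unfold Pre_SolveBackTrackMinesweeper; infer_instance

def pvWitness_SolveBackTrackMinesweeper : List (List String) × List (List Int) × List (List Bool) × Int × Int :=
  ([["-"]], [[1]], [[false]], 1, 1)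

def Spec_SolveBackTrackMinesweeper (grid : List (List String)) (arr : List (List Int)) (visited : List (List Bool)) (N : Int) (M : Int) (out : Bool) : Prop := out = SolveBackTrackMinesweeper_alt grid arr visited N M
instance (grid : List (List String)) (arr : List (List Int)) (visited : List (List Bool)) (N : Int) (M : Int) (out : Bool) : Decidable (Spec_SolveBackTrackMinesweeper grid arr visited N M out) := by unfold Spec_SolveBackTrackMinesweeper; infer_instance

-- ===== CLAIM (what is proved, stated in full; the proofs are below) =====
def Claim_equal_SolveBackTrackMinesweeper : Prop := ∀ (grid : List (List String)) (arr : List (List Int)) (visited : List (List Bool)) (N : Int) (M : Int), Dom_SolveBackTrackMinesweeper grid arr visited N M → Pre_SolveBackTrackMinesweeper grid arr visited N M → Spec_SolveBackTrackMinesweeper grid arr visited N M (SolveBackTrackMinesweeper grid arr visited N M)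

-- ===== LEMMAS AND PROOFS =====
-- ===== proof layer: Nat-index update algebra =====
def natRow (a : List (List Int)) (i : Nat) : List Int := a[i]?.getD []
def natGet2 (a : List (List Int)) (i j : Nat) : Int := (natRow a i)[j]?.getD 0
def natAdd2 (a : List (List Int)) (i j : Nat) (d : Int) : List (List Int) :=
  a.set i ((natRow a i).set j (natGet2 a i j + d))

theorem natRow_set_self (a : List (List Int)) (i : Nat) (v : List Int) (hi : i < a.length) :
    natRow (a.set i v) i = v := by simp [natRow, List.getElem?_set_self hi]

theorem natRow_set_ne (a : List (List Int)) (i i' : Nat) (v : List Int) (h : i ≠ i') :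
    natRow (a.set i v) i' = natRow a i' := by simp [natRow, List.getElem?_set_ne h]

theorem natRow_oob (a : List (List Int)) (i : Nat) (h : a.length ≤ i) :
    natRow a i = [] := by simp [natRow, List.getElem?_eq_none (by omega)]

theorem pvGet2I_nonneg (a : List (List Int)) (x y : Int) (hx : 0 ≤ x) (hy : 0 ≤ y) :
    pvGet2I a x y = natGet2 a x.toNat y.toNat := by
  simp [pvGet2I, natGet2, natRow, PySem.List.pyGetD_of_nonneg _ _ hx,
    PySem.List.pyGetD_of_nonneg _ _ hy, List.getD_eq_getElem?_getD]

theorem pvAdd2_nonneg (a : List (List Int)) (x y d : Int) (hx : 0 ≤ x) (hy : 0 ≤ y) :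
    pvAdd2 a x y d = natAdd2 a x.toNat y.toNat d := by
  simp [pvAdd2, natAdd2, pvGet2I_nonneg a x y hx hy, natGet2, natRow,
    PySem.List.pyGetD_of_nonneg _ _ hx,
    PySem.List.pySetD_of_nonneg _ _ hx, PySem.List.pySetD_of_nonneg _ _ hy,
    List.getD_eq_getElem?_getD]

theorem natAdd2_length (a : List (List Int)) (i j : Nat) (d : Int) :
    (natAdd2 a i j d).length = a.length := by simp [natAdd2]

theorem natAdd2_rowlen (a : List (List Int)) (i j : Nat) (d : Int) (i' : Nat) :
    (natRow (natAdd2 a i j d) i').length = (natRow a i').length := by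
  rcases eq_or_ne i i' with rfl | h
  · rcases lt_or_ge i a.length with hi | hi
    · rw [natAdd2, natRow_set_self _ _ _ hi, List.length_set]
    · rw [natAdd2, List.set_eq_of_length_le (by simpa using hi)]
  · rw [natAdd2, natRow_set_ne _ _ _ _ h]

theorem natAdd2_oob (a : List (List Int)) (i j : Nat) (d : Int) (h : a.length ≤ i) :
    natAdd2 a i j d = a := by
  rw [natAdd2, List.set_eq_of_length_le (by simpa using h)]

theorem natAdd2_nonphys (a : List (List Int)) (i j : Nat) (d : Int)
    (h : i < a.length → (natRow a i).length ≤ j) :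
    natAdd2 a i j d = a := by
  rcases lt_or_ge i a.length with hi | hi
  · have hrow : natRow a i = a[i] := by simp [natRow, List.getElem?_eq_getElem hi]
    rw [natAdd2, List.set_eq_of_length_le (h hi), hrow, List.set_getElem_self]
  · exact natAdd2_oob _ _ _ _ hi

theorem natGet2_add2_self (a : List (List Int)) (i j : Nat) (d : Int)
    (hi : i < a.length) (hj : j < (natRow a i).length) :
    natGet2 (natAdd2 a i j d) i j = natGet2 a i j + d := by
  rw [natGet2, natAdd2, natRow_set_self _ _ _ hi, List.getElem?_set_self (by simpa using hj)]
  rfl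

theorem natGet2_add2_ne (a : List (List Int)) (i j i' j' : Nat) (d : Int)
    (h : ¬(i' = i ∧ j' = j)) :
    natGet2 (natAdd2 a i j d) i' j' = natGet2 a i' j' := by
  by_cases hii : i' = i
  · subst hii
    have hjj : j' ≠ j := fun hc => h ⟨rfl, hc⟩
    rcases lt_or_ge i' a.length with hi | hi
    · rw [natGet2, natAdd2, natRow_set_self _ _ _ hi, List.getElem?_set_ne (Ne.symm hjj)]
      rfl
    · rw [natAdd2_oob _ _ _ _ hi]
  · rw [natGet2, natAdd2, natRow_set_ne _ _ _ _ (Ne.symm hii)]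
    rfl

theorem natAdd2_cancel (a : List (List Int)) (i j : Nat) (d : Int) :
    natAdd2 (natAdd2 a i j d) i j (-d) = a := by
  rcases lt_or_ge i a.length with hi | hi
  · rcases lt_or_ge j (natRow a i).length with hj | hj
    · have hrowA : natRow (natAdd2 a i j d) i = (natRow a i).set j (natGet2 a i j + d) :=
        natRow_set_self _ _ _ hi
      have hval : a[i]?.getD [] = a[i] := by simp [List.getElem?_eq_getElem hi]
      have hgj : natGet2 a i j = (natRow a i)[j] := by
        simp [natGet2, List.getElem?_eq_getElem hj]
      rw [natAdd2, natGet2_add2_self a i j d hi hj, hrowA, List.set_set, add_neg_cancel_right,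
        hgj, List.set_getElem_self, natAdd2]
      rw [List.set_set]
      have : natRow a i = a[i] := by simp [natRow, List.getElem?_eq_getElem hi]
      rw [this, List.set_getElem_self]
    · rw [natAdd2_nonphys a i j d (fun _ => hj), natAdd2_nonphys a i j (-d) (fun _ => hj)]
  · rw [natAdd2_oob _ _ _ _ hi, natAdd2_oob _ _ _ _ hi]

theorem natAdd2_def (a : List (List Int)) (i j : Nat) (d : Int) :
    natAdd2 a i j d = a.set i ((natRow a i).set j (natGet2 a i j + d)) := rfl

theorem natAdd2_comm (a : List (List Int)) (i j i' j' : Nat) (d d' : Int) :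
    natAdd2 (natAdd2 a i j d) i' j' d' = natAdd2 (natAdd2 a i' j' d') i j d := by
  by_cases hphys : i < a.length ∧ j < (natRow a i).length
  · by_cases hphys' : i' < a.length ∧ j' < (natRow a i').length
    · -- both physical
      by_cases hsame : i' = i ∧ j' = j
      · obtain ⟨rfl, rfl⟩ := hsame
        obtain ⟨hi, hj⟩ := hphys
        have r1 : natRow (natAdd2 a i' j' d) i' = (natRow a i').set j' (natGet2 a i' j' + d) :=
          natRow_set_self _ _ _ hi
        have r2 : natRow (natAdd2 a i' j' d') i' = (natRow a i').set j' (natGet2 a i' j' + d') :=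
          natRow_set_self _ _ _ hi
        rw [natAdd2_def (natAdd2 a i' j' d) i' j' d', natGet2_add2_self a i' j' d hi hj, r1,
          natAdd2_def (natAdd2 a i' j' d') i' j' d, natGet2_add2_self a i' j' d' hi hj, r2,
          natAdd2_def a i' j' d, natAdd2_def a i' j' d', List.set_set, List.set_set,
          List.set_set, List.set_set]
        ring_nf
      · -- distinct cells, both physical
        obtain ⟨hi, hj⟩ := hphys; obtain ⟨hi', hj'⟩ := hphys'
        have hA1 : natGet2 (natAdd2 a i j d) i' j' = natGet2 a i' j' :=
          natGet2_add2_ne a i j i' j' d hsame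
        have hsame' : ¬(i = i' ∧ j = j') := fun ⟨h1, h2⟩ => hsame ⟨h1.symm, h2.symm⟩
        have hA2 : natGet2 (natAdd2 a i' j' d') i j = natGet2 a i j :=
          natGet2_add2_ne a i' j' i j d' hsame'
        by_cases hii : i = i'
        · subst hii
          have hjj : j ≠ j' := fun hc => hsame ⟨rfl, hc.symm⟩
          have r1 : natRow (natAdd2 a i j d) i = (natRow a i).set j (natGet2 a i j + d) :=
            natRow_set_self _ _ _ hi
          have r2 : natRow (natAdd2 a i j' d') i = (natRow a i).set j' (natGet2 a i j' + d') :=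
            natRow_set_self _ _ _ hi
          rw [natAdd2_def (natAdd2 a i j d) i j' d', hA1, r1,
            natAdd2_def (natAdd2 a i j' d') i j d, hA2, r2,
            natAdd2_def a i j d, natAdd2_def a i j' d', List.set_set, List.set_set,
            List.set_comm _ _ hjj]
        · have r1 : natRow (natAdd2 a i j d) i' = natRow a i' :=
            natRow_set_ne _ _ _ _ hii
          have r2 : natRow (natAdd2 a i' j' d') i = natRow a i :=
            natRow_set_ne _ _ _ _ (Ne.symm hii)
          rw [natAdd2_def (natAdd2 a i j d) i' j' d', hA1, r1,
            natAdd2_def (natAdd2 a i' j' d') i j d, hA2, r2,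
            natAdd2_def a i j d, natAdd2_def a i' j' d', List.set_comm _ _ hii]
    · -- second op non-physical
      have h2 : ∀ b : List (List Int), b.length = a.length →
          (∀ k, (natRow b k).length = (natRow a k).length) → natAdd2 b i' j' d' = b := by
        intro b hlen hrow
        refine natAdd2_nonphys _ _ _ _ (fun hlt => ?_)
        rw [hrow]
        rcases lt_or_ge i' a.length with hi' | hi'
        · have := fun hj' => hphys' ⟨hi', hj'⟩; omega
        · rw [natRow_oob _ _ hi']; omega
      rw [h2 _ (natAdd2_length _ _ _ _) (natAdd2_rowlen _ _ _ _), h2 a rfl (fun _ => rfl)]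
  · -- first op non-physical
    have h1 : ∀ b : List (List Int), b.length = a.length →
        (∀ k, (natRow b k).length = (natRow a k).length) → natAdd2 b i j d = b := by
      intro b hlen hrow
      refine natAdd2_nonphys _ _ _ _ (fun hlt => ?_)
      rw [hrow]
      rcases lt_or_ge i a.length with hi | hi
      · have := fun hj => hphys ⟨hi, hj⟩; omega
      · rw [natRow_oob _ _ hi]; omega
    rw [h1 a rfl (fun _ => rfl), h1 _ (natAdd2_length _ _ _ _) (natAdd2_rowlen _ _ _ _)]

-- ===== proof layer: canonical search tree =====
def pvOffsetsA : List (Int × Int) := [(-1,0),(0,0),(1,0),(-1,-1),(0,-1),(1,-1),(-1,1),(0,1),(1,1)]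
def pvOffsetsB : List (Int × Int) := [(-1,-1),(-1,0),(-1,1),(0,-1),(0,0),(0,1),(1,-1),(1,0),(1,1)]
def pvShift (x y : Int) (o : Int × Int) : Int × Int := (x + o.1, y + o.2)
def pvPosA (x y N M : Int) : List (Int × Int) :=
  (pvOffsetsA.map (pvShift x y)).filter (fun p => pvIsValid p.1 p.2 N M)

def pvCan (a : List (List Int)) (x y N M : Int) : Bool :=
  (pvNbB x y N M).all (fun p => decide (pvGet2I a p.1 p.2 ≠ 0))
def pvDecAll (a : List (List Int)) (x y N M : Int) : List (List Int) :=
  (pvNbB x y N M).foldl (fun acc p => pvAdd2 acc p.1 p.2 (-1)) a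
def pvAllZero (a : List (List Int)) (N M : Int) : Bool :=
  (PySem.List.pyRange 0 N 1).all (fun i => (PySem.List.pyRange 0 M 1).all (fun j =>
    decide (pvGet2I a i j = 0)))

def pvSub (N M : Int) : List (Int × Int) → List (List Int) → Bool
  | [], a => pvAllZero a N M
  | (x, y) :: cs, a =>
    if pvCan a x y N M then pvSub N M cs (pvDecAll a x y N M) || pvSub N M cs a
    else pvSub N M cs a

def pvSubT (N M : Int) : List (Int × Int) → List (List Int) → Bool
  | [], a => pvAllZeroList a
  | (x, y) :: cs, a =>
    if pvCan a x y N M then pvSubT N M cs (pvDecAll a x y N M) || pvSubT N M cs a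
    else pvSubT N M cs a

def pvCost (N M : Int) : List (Int × Int) → List (List Int) → Nat
  | [], _ => 0
  | (x, y) :: cs, a =>
    if pvCan a x y N M then
      (if pvSubT N M cs (pvDecAll a x y N M) then pvCost N M cs (pvDecAll a x y N M)
       else pvCost N M cs (pvDecAll a x y N M) + 1 + pvCost N M cs a)
    else pvCost N M cs a

-- generic list facts
theorem pvZipIdxDrop {α : Type} (l : List α) (s k : Nat) :
    (l.zipIdx s).drop k = (l.drop k).zipIdx (s + k) := by
  induction l generalizing s k with
  | nil => simp
  | cons a t ih =>
    cases k with
    | zero => simp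
    | succ k =>
      rw [List.zipIdx_cons, List.drop_succ_cons, List.drop_succ_cons, ih (s+1) k]
      ring_nf

theorem pvHeadFlatMap {α β : Type} (L : List α) (g : α → List β) :
    (L.flatMap g).head? = L.findSome? (fun x => (g x).head?) := by
  induction L with
  | nil => rfl
  | cons a t ih =>
    simp only [List.flatMap_cons, List.findSome?_cons]
    cases h : (g a).head? with
    | none => cases hg : g a <;> simp_all
    | some b => cases hg : g a <;> simp_all

theorem pvHeadFilterMap {α β : Type} (l : List α) (p : α → Bool) (f : α → β) :
    ((l.filter p).map f).head? = l.findSome? (fun y => if p y then some (f y) else none) := by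
  induction l with
  | nil => rfl
  | cons a t ih =>
    by_cases h : p a <;> simp [List.filter_cons, h, List.findSome?_cons, ih]

-- B neighbour list in map/filter normal form
theorem pvFilterMapIf {α β : Type} (l : List α) (f : α → β) (c : β → Prop) [DecidablePred c] :
    (l.filterMap (fun v => if c (f v) then some (f v) else none)) =
      (l.map f).filter (fun b => decide (c b)) := by
  induction l with
  | nil => rfl
  | cons a t ih =>
    by_cases h : c (f a) <;> simp [List.filterMap_cons, List.filter_cons, h, ih]

theorem pvNbB_eq (x y N M : Int) :
    pvNbB x y N M = (pvOffsetsB.map (pvShift x y)).filter (fun p => pvIsValid p.1 p.2 N M) := by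
  have hOB : pvOffsetsB = ([-1, 0, 1] : List Int).flatMap
      (fun u => ([-1, 0, 1] : List Int).map (fun v => (u, v))) := by decide
  have hval : (fun p : Int × Int => pvIsValid p.1 p.2 N M) =
      (fun p : Int × Int => decide (0 ≤ p.1 ∧ p.1 < N ∧ 0 ≤ p.2 ∧ p.2 < M)) := by
    funext p; simp [pvIsValid, Bool.and_assoc]
  rw [hOB, hval, List.map_flatMap, List.filter_flatMap, pvNbB]
  refine List.flatMap_congr (fun u hu => ?_)
  rw [List.map_map]
  exact pvFilterMapIf ([-1, 0, 1] : List Int) (fun v => (x + u, y + v))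
    (fun p => 0 ≤ p.1 ∧ p.1 < N ∧ 0 ≤ p.2 ∧ p.2 < M)

theorem pvPosA_perm_nb (x y N M : Int) : (pvPosA x y N M).Perm (pvNbB x y N M) := by
  rw [pvNbB_eq, pvPosA]
  exact ((List.Perm.map (pvShift x y) (by decide)).filter _)

theorem pvMemNb (x y N M : Int) (p : Int × Int) (h : p ∈ pvNbB x y N M) :
    0 ≤ p.1 ∧ p.1 < N ∧ 0 ≤ p.2 ∧ p.2 < M := by
  rw [pvNbB_eq] at h
  have := List.of_mem_filter h
  simp only [pvIsValid, Bool.and_eq_true, decide_eq_true_eq] at this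
  tauto

-- ===== A's helpers vs canonical ops =====
theorem pvMapRange9 (x y : Int) :
    (PySem.List.pyRange 0 9 1).map (fun i =>
        (x + PySem.List.pyGetD pvDx i 0, y + PySem.List.pyGetD pvDy i 0)) =
      pvOffsetsA.map (pvShift x y) := by
  rw [show PySem.List.pyRange 0 9 1 = ([0,1,2,3,4,5,6,7,8] : List Int) from by decide]
  simp [pvDx, pvDy, pvOffsetsA, pvShift, PySem.List.pyGetD, PySem.List.pyIdx?]

theorem pvAllFilter {α : Type} (l : List α) (c z : α → Bool) :
    (l.filter c).all z = l.all (fun p => !(c p && !(z p))) := by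
  induction l with
  | nil => rfl
  | cons a t ih => by_cases h : c a <;> cases hz : z a <;> simp [List.filter_cons, h, ih, hz]

theorem pvPermAll {α : Type} (l l' : List α) (h : l.Perm l') (z : α → Bool) :
    l.all z = l'.all z := by
  rw [Bool.eq_iff_iff, List.all_eq_true, List.all_eq_true]
  exact ⟨fun H p hp => H p (h.mem_iff.mpr hp), fun H p hp => H p (h.mem_iff.mp hp)⟩

theorem pvPosA_nonneg (x y N M : Int) (p : Int × Int) (h : p ∈ pvPosA x y N M) :
    0 ≤ p.1 ∧ 0 ≤ p.2 := by
  have := List.of_mem_filter h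
  simp only [pvIsValid, Bool.and_eq_true, decide_eq_true_eq] at this
  exact ⟨this.1.1.1, this.1.2⟩

-- commutation of the cell updates, for elements of pvPosA
theorem pvAddComm (p q : Int × Int) (hp : 0 ≤ p.1 ∧ 0 ≤ p.2) (hq : 0 ≤ q.1 ∧ 0 ≤ q.2)
    (d d' : Int) (z : List (List Int)) :
    pvAdd2 (pvAdd2 z p.1 p.2 d) q.1 q.2 d' = pvAdd2 (pvAdd2 z q.1 q.2 d') p.1 p.2 d := by
  rw [pvAdd2_nonneg _ _ _ _ hp.1 hp.2, pvAdd2_nonneg _ _ _ _ hq.1 hq.2,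
    pvAdd2_nonneg _ _ _ _ hq.1 hq.2, pvAdd2_nonneg _ _ _ _ hp.1 hp.2, natAdd2_comm]

theorem pvAddFoldlComm (x y N M : Int) (d : Int) :
    ∀ p ∈ pvPosA x y N M, ∀ q ∈ pvPosA x y N M, ∀ z : List (List Int),
      pvAdd2 (pvAdd2 z p.1 p.2 d) q.1 q.2 d = pvAdd2 (pvAdd2 z q.1 q.2 d) p.1 p.2 d :=
  fun p hp q hq z =>
    pvAddComm p q (pvPosA_nonneg x y N M p hp) (pvPosA_nonneg x y N M q hq) d d z

-- A's guarded 9-offset fold, normalised to a fold over pvPosA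
theorem pvFoldIfEq (a : List (List Int)) (x y N M : Int) (d : Int) :
    ((PySem.List.pyRange 0 9 1).foldl (fun acc i =>
      if pvIsValid (x + PySem.List.pyGetD pvDx i 0) (y + PySem.List.pyGetD pvDy i 0) N M
      then pvAdd2 acc (x + PySem.List.pyGetD pvDx i 0) (y + PySem.List.pyGetD pvDy i 0) d
      else acc) a) =
    (pvPosA x y N M).foldl (fun acc p => pvAdd2 acc p.1 p.2 d) a := by
  rw [pvPosA, List.foldl_filter]
  rw [← pvMapRange9 x y, List.foldl_map]

theorem pvAddFoldInterchange (t : List (Int × Int)) (p : Int × Int)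
    (hp : 0 ≤ p.1 ∧ 0 ≤ p.2) (ht : ∀ q ∈ t, 0 ≤ q.1 ∧ 0 ≤ q.2) (d d' : Int) :
    ∀ z : List (List Int),
      pvAdd2 (t.foldl (fun acc q => pvAdd2 acc q.1 q.2 d') z) p.1 p.2 d =
      t.foldl (fun acc q => pvAdd2 acc q.1 q.2 d') (pvAdd2 z p.1 p.2 d) := by
  induction t with
  | nil => intro z; rfl
  | cons q t' ih =>
    intro z
    have hq := ht q List.mem_cons_self
    have ht' : ∀ r ∈ t', 0 ≤ r.1 ∧ 0 ≤ r.2 := fun r hr => ht r (List.mem_cons_of_mem _ hr)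
    simp only [List.foldl_cons]
    rw [ih ht' (pvAdd2 z q.1 q.2 d'), pvAddComm q p hq hp d' d z]

theorem pvAdd2_cancel' (a : List (List Int)) (p : Int × Int) (hp : 0 ≤ p.1 ∧ 0 ≤ p.2) :
    pvAdd2 (pvAdd2 a p.1 p.2 (-1)) p.1 p.2 1 = a := by
  rw [pvAdd2_nonneg _ _ _ _ hp.1 hp.2, pvAdd2_nonneg _ _ _ _ hp.1 hp.2]
  have := natAdd2_cancel a p.1.toNat p.2.toNat (-1)
  norm_num at this ⊢
  exact this

theorem pvFoldCancel (L : List (Int × Int)) (a : List (List Int))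
    (h : ∀ p ∈ L, 0 ≤ p.1 ∧ 0 ≤ p.2) :
    L.foldl (fun acc p => pvAdd2 acc p.1 p.2 1)
      (L.foldl (fun acc p => pvAdd2 acc p.1 p.2 (-1)) a) = a := by
  induction L generalizing a with
  | nil => rfl
  | cons p t ih =>
    have hp := h p List.mem_cons_self
    have ht : ∀ q ∈ t, 0 ≤ q.1 ∧ 0 ≤ q.2 := fun q hq => h q (List.mem_cons_of_mem _ hq)
    simp only [List.foldl_cons]
    rw [pvAddFoldInterchange t p hp ht 1 (-1), pvAdd2_cancel' a p hp, ih _ ht]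

-- the check inside canAssignMine equals pvCan
theorem pvCheckEq (a : List (List Int)) (x y N M : Int) :
    ((PySem.List.pyRange 0 9 1).all (fun i =>
      !(pvIsValid (x + PySem.List.pyGetD pvDx i 0) (y + PySem.List.pyGetD pvDy i 0) N M
          && decide (pvGet2I a (x + PySem.List.pyGetD pvDx i 0) (y + PySem.List.pyGetD pvDy i 0) = 0)))) =
    pvCan a x y N M := by
  have h1 : ((PySem.List.pyRange 0 9 1).map (fun i =>
        (x + PySem.List.pyGetD pvDx i 0, y + PySem.List.pyGetD pvDy i 0))).all
        (fun p => !(pvIsValid p.1 p.2 N M && decide (pvGet2I a p.1 p.2 = 0))) =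
      (PySem.List.pyRange 0 9 1).all (fun i =>
        !(pvIsValid (x + PySem.List.pyGetD pvDx i 0) (y + PySem.List.pyGetD pvDy i 0) N M
          && decide (pvGet2I a (x + PySem.List.pyGetD pvDx i 0) (y + PySem.List.pyGetD pvDy i 0) = 0))) :=
    List.all_map
  rw [← h1, pvMapRange9]
  have h2 : (pvOffsetsA.map (pvShift x y)).all
        (fun p => !(pvIsValid p.1 p.2 N M && decide (pvGet2I a p.1 p.2 = 0))) =
      (pvPosA x y N M).all (fun p => !(decide (pvGet2I a p.1 p.2 = 0))) := by
    rw [pvPosA, pvAllFilter]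
    simp
  rw [h2, pvCan, pvPermAll _ _ (pvPosA_perm_nb x y N M).symm]
  simp

-- the decrement loop inside canAssignMine equals pvDecAll
theorem pvDecEq (a : List (List Int)) (x y N M : Int) :
    ((PySem.List.pyRange 0 9 1).foldl (fun acc i =>
      if pvIsValid (x + PySem.List.pyGetD pvDx i 0) (y + PySem.List.pyGetD pvDy i 0) N M
      then pvAdd2 acc (x + PySem.List.pyGetD pvDx i 0) (y + PySem.List.pyGetD pvDy i 0) (-1)
      else acc) a) = pvDecAll a x y N M := by
  rw [pvFoldIfEq a x y N M (-1), pvDecAll]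
  exact (pvPosA_perm_nb x y N M).foldl_eq' (pvAddFoldlComm x y N M (-1)) a

theorem pvCanAssign_eq (a : List (List Int)) (x y N M : Int) (hv : pvIsValid x y N M = true) :
    pvCanAssignMine a x y N M =
      (if pvCan a x y N M then (true, pvDecAll a x y N M) else (false, a)) := by
  rw [pvCanAssignMine, hv]
  simp only [Bool.not_true, Bool.false_eq_true, if_false, pvCheckEq, pvDecEq]

-- undo: the increment loop restores the matrix
theorem pvUndoMine_decAll (a : List (List Int)) (x y N M : Int) :
    pvUndoMine (pvDecAll a x y N M) x y N M = a := by
  rw [pvUndoMine, pvFoldIfEq _ x y N M 1, pvDecAll,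
    ← (pvPosA_perm_nb x y N M).foldl_eq' (pvAddFoldlComm x y N M (-1)) a]
  exact pvFoldCancel (pvPosA x y N M) a (fun p hp => pvPosA_nonneg x y N M p hp)

-- ===== visited-matrix lemmas =====
theorem pvGet2B_false_phys (v : List (List Bool)) (x y : Int) (hx : 0 ≤ x) (hy : 0 ≤ y)
    (h : pvGet2B v x y = false) :
    x.toNat < v.length ∧ y.toNat < (v[x.toNat]?.getD []).length := by
  rw [pvGet2B, PySem.List.pyGetD_of_nonneg _ _ hx, PySem.List.pyGetD_of_nonneg _ _ hy,
    List.getD_eq_getElem?_getD, List.getD_eq_getElem?_getD] at h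
  rcases lt_or_ge x.toNat v.length with hxl | hxl
  · refine ⟨hxl, ?_⟩
    rcases lt_or_ge y.toNat (v[x.toNat]?.getD []).length with hyl | hyl
    · exact hyl
    · rw [List.getElem?_eq_none (by omega)] at h; simp at h
  · rw [List.getElem?_eq_none (l := v) (by omega)] at h; simp at h

theorem pvSet2B_nonneg (v : List (List Bool)) (x y : Int) (b : Bool) (hx : 0 ≤ x) (hy : 0 ≤ y) :
    pvSet2B v x y b = v.set x.toNat ((v[x.toNat]?.getD []).set y.toNat b) := by
  rw [pvSet2B, PySem.List.pyGetD_of_nonneg _ _ hx, PySem.List.pySetD_of_nonneg _ _ hx,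
    PySem.List.pySetD_of_nonneg _ _ hy, List.getD_eq_getElem?_getD]

theorem pvGet2B_nonneg (v : List (List Bool)) (x y : Int) (hx : 0 ≤ x) (hy : 0 ≤ y) :
    pvGet2B v x y = (v[x.toNat]?.getD [])[y.toNat]?.getD true := by
  rw [pvGet2B, PySem.List.pyGetD_of_nonneg _ _ hx, PySem.List.pyGetD_of_nonneg _ _ hy,
    List.getD_eq_getElem?_getD, List.getD_eq_getElem?_getD]

theorem pvGet2B_set_self (v : List (List Bool)) (x y : Int) (b : Bool) (hx : 0 ≤ x) (hy : 0 ≤ y)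
    (hphys : x.toNat < v.length ∧ y.toNat < (v[x.toNat]?.getD []).length) :
    pvGet2B (pvSet2B v x y b) x y = b := by
  rw [pvSet2B_nonneg _ _ _ _ hx hy, pvGet2B_nonneg _ _ _ hx hy,
    List.getElem?_set_self hphys.1, Option.getD_some, List.getElem?_set_self hphys.2,
    Option.getD_some]

theorem pvGet2B_set_ne (v : List (List Bool)) (x y x' y' : Int) (b : Bool)
    (hx : 0 ≤ x) (hy : 0 ≤ y) (hx' : 0 ≤ x') (hy' : 0 ≤ y')
    (h : ¬(x' = x ∧ y' = y)) :
    pvGet2B (pvSet2B v x y b) x' y' = pvGet2B v x' y' := by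
  rw [pvSet2B_nonneg _ _ _ _ hx hy, pvGet2B_nonneg _ _ _ hx' hy', pvGet2B_nonneg _ _ _ hx' hy']
  by_cases hxx : x'.toNat = x.toNat
  · have hxe : x' = x := by omega
    have hyy : y' ≠ y := fun hc => h ⟨hxe, hc⟩
    have hyn : y'.toNat ≠ y.toNat := by omega
    rcases lt_or_ge x.toNat v.length with hxl | hxl
    · rw [hxx, List.getElem?_set_self hxl, Option.getD_some, List.getElem?_set_ne (Ne.symm hyn)]
    · rw [List.set_eq_of_length_le (l := v) (by omega)]
  · rw [List.getElem?_set_ne (fun hc => hxx hc.symm)]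

theorem pvSet2B_restore (v : List (List Bool)) (x y : Int) (hx : 0 ≤ x) (hy : 0 ≤ y)
    (hfalse : pvGet2B v x y = false) :
    pvSet2B (pvSet2B v x y true) x y false = v := by
  obtain ⟨h1, h2⟩ := pvGet2B_false_phys v x y hx hy hfalse
  rw [pvSet2B_nonneg _ _ _ _ hx hy, pvSet2B_nonneg _ _ _ _ hx hy,
    List.getElem?_set_self h1, Option.getD_some, List.set_set, List.set_set]
  have hval : (v[x.toNat]?.getD [])[y.toNat] = false := by
    rw [pvGet2B_nonneg _ _ _ hx hy] at hfalse
    rw [← Option.getD_some (a := (v[x.toNat]?.getD [])[y.toNat]) (b := true),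
      ← List.getElem?_eq_getElem h2]
    exact hfalse
  rw [← hval, List.set_getElem_self]
  have : v[x.toNat]?.getD [] = v[x.toNat] := by
    rw [List.getElem?_eq_getElem h1]; rfl
  rw [this, List.set_getElem_self]

-- membership in the cell list
theorem pvMemCells (v : List (List Bool)) (N M : Int) (p : Int × Int) :
    p ∈ pvCellsB v N M ↔
      0 ≤ p.1 ∧ p.1 < N ∧ 0 ≤ p.2 ∧ p.2 < M ∧ pvGet2B v p.1 p.2 = false := by
  simp only [pvCellsB, List.mem_flatMap, List.mem_map, List.mem_filter,
    PySem.List.mem_pyRange_one]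
  constructor
  · rintro ⟨x, ⟨hx0, hxN⟩, y, ⟨⟨hy0, hyM⟩, hg⟩, rfl⟩
    simp_all
  · rintro ⟨h1, h2, h3, h4, h5⟩
    exact ⟨p.1, ⟨h1, h2⟩, p.2, ⟨⟨h3, h4⟩, by simpa using h5⟩, rfl⟩

-- findUnvisited returns the head of the cell list
theorem pvFind_eq_head (v : List (List Bool)) (N M : Int) :
    pvFindUnvisited v N M = (pvCellsB v N M).head? := by
  rw [pvFindUnvisited, pvCellsB, pvHeadFlatMap]
  congr 1
  funext x
  rw [pvHeadFilterMap]

-- isVisitedandSatisfied in terms of the cell list and pvAllZero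
theorem pvIsVS_eq (a : List (List Int)) (v : List (List Bool)) (N M : Int) :
    pvIsVisitedandSatisfied a v N M = (decide (pvCellsB v N M = []) && pvAllZero a N M) := by
  rw [Bool.eq_iff_iff]
  simp only [pvIsVisitedandSatisfied, pvAllZero, pvCellsB, Bool.and_eq_true,
    List.all_eq_true, decide_eq_true_eq, List.flatMap_eq_nil_iff, List.map_eq_nil_iff,
    List.filter_eq_nil_iff, Bool.not_eq_true]
  constructor
  · intro H
    constructor
    · intro x hx y hy
      have h := H x hx y hy
      simp only [Bool.not_or, Bool.and_eq_true, Bool.not_eq_eq_eq_not, Bool.not_true] at h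
      simp [h.2]
    · intro i hi j hj
      have h := H i hi j hj
      simp only [Bool.not_or, Bool.and_eq_true, Bool.not_eq_eq_eq_not, Bool.not_true,
        decide_eq_false_iff_not, not_not] at h
      exact h.1
  · intro ⟨H1, H2⟩ i hi j hj
    have h1 := H1 i hi j hj
    have h2 := H2 i hi j hj
    simp only [Bool.not_eq_true] at h1
    simp [h1, h2]

-- ===== marking the first unvisited cell removes it from the cell list =====
theorem pvFilterMarkHead {α : Type} [DecidableEq α] (l : List α) (p p' : α → Bool) (a : α)
    (tl : List α) (hnd : l.Nodup) (h : l.filter p = a :: tl)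
    (hne : ∀ b ∈ l, b ≠ a → p' b = p b) (ha : p' a = false) :
    l.filter p' = tl := by
  revert hnd hne h
  induction l generalizing tl with
  | nil => intro hnd h hne; simp at h
  | cons c l' ih =>
    intro hnd h hne
    have hnd' := (List.nodup_cons.mp hnd).2
    have hcl' := (List.nodup_cons.mp hnd).1
    by_cases hpc : p c
    · rw [List.filter_cons_of_pos hpc] at h
      obtain ⟨rfl, htl⟩ := List.cons.inj h
      rw [List.filter_cons_of_neg (by simp [ha]), ← htl]
      exact List.filter_congr (fun b hb => hne b (List.mem_cons_of_mem _ hb)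
        (fun hc => hcl' (hc ▸ hb)))
    · rw [List.filter_cons_of_neg (by simp [hpc])] at h
      have hca : c ≠ a := by
        intro rfl
        have : c ∈ l'.filter p := h ▸ List.mem_cons_self
        exact hcl' (List.mem_of_mem_filter this)
      rw [List.filter_cons_of_neg (by simp [hne c List.mem_cons_self hca, hpc])]
      exact ih _ hnd' h (fun b hb hba => hne b (List.mem_cons_of_mem _ hb) hba)

theorem pvCellsMark (v : List (List Bool)) (N M x y : Int) (cs : List (Int × Int))
    (h : pvCellsB v N M = (x, y) :: cs) :
    pvCellsB (pvSet2B v x y true) N M = cs := by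
  have hmem : (x, y) ∈ pvCellsB v N M := h ▸ List.mem_cons_self
  obtain ⟨hx0, hxN, hy0, hyM, hfalse⟩ := (pvMemCells v N M (x, y)).mp hmem
  have hphys := pvGet2B_false_phys v x y hx0 hy0 hfalse
  -- unchanged rows
  have hrow_ne : ∀ x' : Int, x' ≠ x → ∀ y' : Int, 0 ≤ x' → 0 ≤ y' →
      pvGet2B (pvSet2B v x y true) x' y' = pvGet2B v x' y' := by
    intro x' hx' y' h0 h0'
    exact pvGet2B_set_ne v x y x' y' true hx0 hy0 h0 h0' (fun hc => hx' hc.1)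
  -- generalized induction over the row range
  have main : ∀ (L : List Int), L.Nodup → (∀ c ∈ L, 0 ≤ c) →
      ∀ cs', (L.flatMap (fun c =>
          ((PySem.List.pyRange 0 M 1).filter (fun y' => !pvGet2B v c y')).map (fun y' => (c, y')))
        = (x, y) :: cs') →
      (L.flatMap (fun c =>
          ((PySem.List.pyRange 0 M 1).filter (fun y' => !pvGet2B (pvSet2B v x y true) c y')).map
            (fun y' => (c, y')))
        = cs') := by
    intro L
    induction L with
    | nil => intro _ _ cs' h'; simp at h'
    | cons c L' ih =>
      intro hnd hpos cs' h'
      have hnd' := (List.nodup_cons.mp hnd).2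
      have hcl' := (List.nodup_cons.mp hnd).1
      have hpos' : ∀ c' ∈ L', 0 ≤ c' := fun c' hc => hpos c' (List.mem_cons_of_mem _ hc)
      have hc0 : 0 ≤ c := hpos c List.mem_cons_self
      rw [List.flatMap_cons] at h'
      cases hin : ((PySem.List.pyRange 0 M 1).filter (fun y' => !pvGet2B v c y')) with
      | nil =>
        rw [hin] at h'; simp only [List.map_nil, List.nil_append] at h'
        have hcx : c ≠ x := by
          intro rfl
          have hm : (c, y) ∈ L'.flatMap (fun c' =>
              ((PySem.List.pyRange 0 M 1).filter (fun y' => !pvGet2B v c' y')).map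
                (fun y' => (c', y'))) := h' ▸ List.mem_cons_self
          obtain ⟨c', hc', hp⟩ := List.mem_flatMap.mp hm
          obtain ⟨y', _, hpair⟩ := List.mem_map.mp hp
          injection hpair with h1 h2
          exact hcl' (h1 ▸ hc')
        rw [List.flatMap_cons]
        have : ((PySem.List.pyRange 0 M 1).filter
            (fun y' => !pvGet2B (pvSet2B v x y true) c y')) = [] := by
          rw [List.filter_congr (fun y' hy' => ?_), hin]
          rw [hrow_ne c hcx y' hc0 (((PySem.List.mem_pyRange_one).mp hy').1)]
        rw [this, List.map_nil, List.nil_append]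
        exact ih hnd' hpos' cs' h'
      | cons yh ytl =>
        rw [hin] at h'
        simp only [List.map_cons, List.cons_append] at h'
        obtain ⟨hpair, hrest⟩ := List.cons.inj h'
        injection hpair with h1 h2
        rcases h1.symm with rfl
        rcases h2.symm with rfl
        -- this row: filter with the marked cell drops the head
        have hnodupM : (PySem.List.pyRange 0 M 1).Nodup := PySem.List.nodup_pyRange_one 0 M
        have hrow : ((PySem.List.pyRange 0 M 1).filter
            (fun y' => !pvGet2B (pvSet2B v x y true) x y')) = ytl := by
          refine pvFilterMarkHead _ _ _ y ytl hnodupM hin (fun b hb hba => ?_) ?_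
          · rw [pvGet2B_set_ne v x y x b true hx0 hy0 hx0
              (((PySem.List.mem_pyRange_one).mp hb).1) (fun hc => hba hc.2)]
          · rw [pvGet2B_set_self v x y true hx0 hy0 hphys]; rfl
        -- remaining rows unchanged
        have hrows : (L'.flatMap (fun c' =>
            ((PySem.List.pyRange 0 M 1).filter
              (fun y' => !pvGet2B (pvSet2B v x y true) c' y')).map (fun y' => (c', y'))))
            = (L'.flatMap (fun c' =>
            ((PySem.List.pyRange 0 M 1).filter (fun y' => !pvGet2B v c' y')).map
              (fun y' => (c', y')))) := by
          refine List.flatMap_congr (fun c' hc' => ?_)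
          congr 1
          refine List.filter_congr (fun y' hy' => ?_)
          rw [hrow_ne c' (fun hc => hcl' (hc ▸ hc')) y' (hpos' c' hc')
            (((PySem.List.mem_pyRange_one).mp hy').1)]
        rw [List.flatMap_cons, hrow, hrows, ← hrest]
  -- apply
  have := main (PySem.List.pyRange 0 N 1) (PySem.List.nodup_pyRange_one 0 N)
    (fun c hc => ((PySem.List.mem_pyRange_one).mp hc).1) cs h
  exact this

-- ===== A's recursion computes the canonical search tree =====
theorem pvSolveA_eq (N M : Int) : ∀ (cs : List (Int × Int)) (fuel : Nat)
    (g : List (List String)) (a : List (List Int)) (v : List (List Bool)),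
    pvCellsB v N M = cs → cs.length < fuel →
    (pvSolveA fuel g a v N M).1 = pvSub N M cs a ∧
    (pvSub N M cs a = false → ∃ g', pvSolveA fuel g a v N M = (false, g', a, v)) := by
  intro cs
  induction cs with
  | nil =>
    intro fuel g a v hcells hfuel
    obtain ⟨f, rfl⟩ : ∃ f, fuel = f + 1 := ⟨fuel - 1, by omega⟩
    have hisVS : pvIsVisitedandSatisfied a v N M = pvAllZero a N M := by
      rw [pvIsVS_eq, hcells]; simp
    cases hz : pvAllZero a N M with
    | true =>
      constructor
      · simp only [pvSolveA, hisVS, hz, if_true, pvSub]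
      · intro hc; rw [pvSub] at hc; rw [hz] at hc; simp at hc
    | false =>
      have hfind : pvFindUnvisited v N M = none := by rw [pvFind_eq_head, hcells]; rfl
      constructor
      · simp only [pvSolveA, hisVS, hz, Bool.false_eq_true, if_false, hfind, pvSub]
      · intro _; exact ⟨g, by simp only [pvSolveA, hisVS, hz, Bool.false_eq_true, if_false, hfind]⟩
  | cons hd cs2 ih =>
    obtain ⟨x, y⟩ := hd
    intro fuel g a v hcells hfuel
    obtain ⟨f, rfl⟩ : ∃ f, fuel = f + 1 := ⟨fuel - 1, by omega⟩
    have hf2 : cs2.length < f := by simp at hfuel; omega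
    have hmem : (x, y) ∈ pvCellsB v N M := hcells ▸ List.mem_cons_self
    obtain ⟨hx0, hxN, hy0, hyM, hfalse⟩ := (pvMemCells v N M (x, y)).mp hmem
    have hv : pvIsValid x y N M = true := by simp [pvIsValid]; omega
    have hisVS : pvIsVisitedandSatisfied a v N M = false := by
      rw [pvIsVS_eq, hcells]; simp
    have hfind : pvFindUnvisited v N M = some (x, y) := by rw [pvFind_eq_head, hcells]; rfl
    have hcells1 : pvCellsB (pvSet2B v x y true) N M = cs2 := pvCellsMark v N M x y cs2 hcells
    have hrestore : pvSet2B (pvSet2B v x y true) x y false = v :=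
      pvSet2B_restore v x y hx0 hy0 hfalse
    cases hcan : pvCan a x y N M with
    | true =>
      have hca : pvCanAssignMine a x y N M = (true, pvDecAll a x y N M) := by
        rw [pvCanAssign_eq a x y N M hv, hcan]; simp
      have hsubeq : pvSub N M ((x, y) :: cs2) a =
          (pvSub N M cs2 (pvDecAll a x y N M) || pvSub N M cs2 a) := by
        rw [pvSub, hcan]; simp
      obtain ⟨ih11, ih12⟩ := ih f (pvSet2S g x y "X") (pvDecAll a x y N M)
        (pvSet2B v x y true) hcells1 hf2
      cases hsub1 : pvSub N M cs2 (pvDecAll a x y N M) with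
      | true =>
        rcases hrec : pvSolveA f (pvSet2S g x y "X") (pvDecAll a x y N M)
            (pvSet2B v x y true) N M with ⟨b, g2, a2, v2⟩
        have hb : b = true := by rw [hrec] at ih11; rw [hsub1] at ih11; exact ih11
        subst hb
        constructor
        · simp only [pvSolveA, hisVS, Bool.false_eq_true, if_false, hfind, hca, hrec, hsubeq,
            hsub1, Bool.true_or]
        · intro hc; rw [hsubeq, hsub1] at hc; simp at hc
      | false =>
        obtain ⟨g2, hrec⟩ := ih12 (by rw [hsub1])
        have hundo : pvUndoMine (pvDecAll a x y N M) x y N M = a := pvUndoMine_decAll a x y N M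
        obtain ⟨ih21, ih22⟩ := ih f (pvSet2S g2 x y "-") a (pvSet2B v x y true) hcells1 hf2
        cases hsub2 : pvSub N M cs2 a with
        | true =>
          rcases hrec2 : pvSolveA f (pvSet2S g2 x y "-") a (pvSet2B v x y true) N M
            with ⟨b2, g4, a4, v4⟩
          have hb2 : b2 = true := by rw [hrec2] at ih21; rw [hsub2] at ih21; exact ih21
          subst hb2
          constructor
          · simp only [pvSolveA, hisVS, Bool.false_eq_true, if_false, hfind, hca, hrec, hundo,
              hrec2, hsubeq, hsub1, hsub2, Bool.or_true]
          · intro hc; rw [hsubeq, hsub2] at hc; simp at hc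
        | false =>
          obtain ⟨g4, hrec2⟩ := ih22 (by rw [hsub2])
          constructor
          · simp only [pvSolveA, hisVS, Bool.false_eq_true, if_false, hfind, hca, hrec, hundo,
              hrec2, hsubeq, hsub1, hsub2, Bool.or_false]
          · intro _
            refine ⟨g4, ?_⟩
            simp only [pvSolveA, hisVS, Bool.false_eq_true, if_false, hfind, hca, hrec, hundo,
              hrec2, hrestore]
    | false =>
      have hca : pvCanAssignMine a x y N M = (false, a) := by
        rw [pvCanAssign_eq a x y N M hv, hcan]; simp
      have hsubeq : pvSub N M ((x, y) :: cs2) a = pvSub N M cs2 a := by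
        rw [pvSub, hcan]; simp
      obtain ⟨ih11, ih12⟩ := ih f g a (pvSet2B v x y true) hcells1 hf2
      cases hsub1 : pvSub N M cs2 a with
      | true =>
        rcases hrec : pvSolveA f g a (pvSet2B v x y true) N M with ⟨b, g2, a2, v2⟩
        have hb : b = true := by rw [hrec] at ih11; rw [hsub1] at ih11; exact ih11
        subst hb
        constructor
        · simp only [pvSolveA, hisVS, Bool.false_eq_true, if_false, hfind, hca, hrec, hsubeq,
            hsub1]
        · intro hc; rw [hsubeq, hsub1] at hc; simp at hc
      | false =>
        obtain ⟨g2, hrec⟩ := ih12 (by rw [hsub1])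
        constructor
        · simp only [pvSolveA, hisVS, Bool.false_eq_true, if_false, hfind, hca, hrec, hsubeq,
            hsub1]
        · intro _
          exact ⟨g2, by simp only [pvSolveA, hisVS, Bool.false_eq_true, if_false, hfind, hca,
            hrec, hrestore]⟩

-- ===== the explicit-stack engine computes the canonical search tree =====
theorem pvZipIdxDropCons (cells cs2 : List (Int × Int)) (x y : Int) (k : Nat)
    (h : cells.drop k = (x, y) :: cs2) :
    cells.zipIdx.drop k = ((x, y), k) :: cells.zipIdx.drop (k + 1) := by
  have h2 : cells.drop (k + 1) = cs2 := by
    have ht := congrArg List.tail h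
    rwa [List.tail_drop] at ht
  rw [show cells.zipIdx = cells.zipIdx 0 from rfl, pvZipIdxDrop, pvZipIdxDrop, h, h2]
  rw [List.zipIdx_cons]
  simp [Nat.add_comm]

theorem pvZipIdxDropNil (cells : List (Int × Int)) (k : Nat) (h : cells.drop k = []) :
    cells.zipIdx.drop k = [] := by
  rw [show cells.zipIdx = cells.zipIdx 0 from rfl, pvZipIdxDrop, h]; rfl

theorem pvLoopB_stepMine (N M : Int) (cells : List (Int × Int)) (cs2 : List (Int × Int))
    (x y : Int) (k n : Nat) (a : List (List Int)) (st : List (Nat × List (List Int)))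
    (hdrop : cells.drop k = (x, y) :: cs2) (hcan : pvCan a x y N M = true) :
    pvLoopB N M cells (n + 1) k a st =
      pvLoopB N M cells (n + 1) (k + 1) (pvDecAll a x y N M) ((k, a) :: st) := by
  simp only [pvLoopB, pvZipIdxDropCons cells cs2 x y k hdrop, pvDescendB]
  rw [show ((pvNbB x y N M).all fun p => decide (pvGet2I a p.1 p.2 ≠ 0)) =
    pvCan a x y N M from rfl, hcan]
  rfl

theorem pvLoopB_stepSkip (N M : Int) (cells : List (Int × Int)) (cs2 : List (Int × Int))
    (x y : Int) (k n : Nat) (a : List (List Int)) (st : List (Nat × List (List Int)))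
    (hdrop : cells.drop k = (x, y) :: cs2) (hcan : pvCan a x y N M = false) :
    pvLoopB N M cells (n + 1) k a st = pvLoopB N M cells (n + 1) (k + 1) a st := by
  simp only [pvLoopB, pvZipIdxDropCons cells cs2 x y k hdrop, pvDescendB]
  rw [show ((pvNbB x y N M).all fun p => decide (pvGet2I a p.1 p.2 ≠ 0)) =
    pvCan a x y N M from rfl, hcan]
  rfl

theorem pvLoopB_eq (N M : Int) (cells : List (Int × Int)) :
    ∀ (cs : List (Int × Int)) (k : Nat) (a : List (List Int))
      (st : List (Nat × List (List Int))) (fuel : Nat),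
      cells.drop k = cs →
      pvLoopB N M cells (pvCost N M cs a + fuel + 1) k a st =
        (if pvSubT N M cs a then true
         else match st with
           | [] => false
           | (k', a') :: rest => pvLoopB N M cells fuel (k' + 1) a' rest) := by
  intro cs
  induction cs with
  | nil =>
    intro k a st fuel hdrop
    simp only [pvCost, Nat.zero_add, pvLoopB, pvZipIdxDropNil cells k hdrop, pvDescendB, pvSubT]
    rfl
  | cons hd cs2 ih =>
    obtain ⟨x, y⟩ := hd
    intro k a st fuel hdrop
    have hdrop2 : cells.drop (k + 1) = cs2 := by
      have ht := congrArg List.tail hdrop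
      rwa [List.tail_drop] at ht
    cases hcan : pvCan a x y N M with
    | true =>
      have hsubeq : pvSubT N M ((x, y) :: cs2) a =
          (pvSubT N M cs2 (pvDecAll a x y N M) || pvSubT N M cs2 a) := by
        rw [pvSubT, hcan]; simp
      cases hsub1 : pvSubT N M cs2 (pvDecAll a x y N M) with
      | true =>
        have hcost : pvCost N M ((x, y) :: cs2) a = pvCost N M cs2 (pvDecAll a x y N M) := by
          rw [pvCost, hcan]; simp [hsub1]
        rw [hcost, pvLoopB_stepMine N M cells cs2 x y k _ a st hdrop hcan,
          ih (k + 1) (pvDecAll a x y N M) ((k, a) :: st) fuel hdrop2, hsub1, hsubeq, hsub1]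
        simp
      | false =>
        have hcost : pvCost N M ((x, y) :: cs2) a =
            pvCost N M cs2 (pvDecAll a x y N M) + 1 + pvCost N M cs2 a := by
          rw [pvCost, hcan]; simp [hsub1]
        have harith : pvCost N M ((x, y) :: cs2) a + fuel + 1 =
            pvCost N M cs2 (pvDecAll a x y N M) + (pvCost N M cs2 a + fuel + 1) + 1 := by
          rw [hcost]; omega
        rw [harith, pvLoopB_stepMine N M cells cs2 x y k _ a st hdrop hcan,
          ih (k + 1) (pvDecAll a x y N M) ((k, a) :: st) (pvCost N M cs2 a + fuel + 1) hdrop2,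
          hsub1, hsubeq, hsub1]
        simp only [Bool.false_or, if_false, Bool.false_eq_true]
        exact ih (k + 1) a st fuel hdrop2
    | false =>
      have hsubeq : pvSubT N M ((x, y) :: cs2) a = pvSubT N M cs2 a := by
        rw [pvSubT, hcan]; simp
      have hcost : pvCost N M ((x, y) :: cs2) a = pvCost N M cs2 a := by
        rw [pvCost, hcan]; simp
      rw [hcost, pvLoopB_stepSkip N M cells cs2 x y k _ a st hdrop hcan,
        ih (k + 1) a st fuel hdrop2, hsubeq]

theorem pvCost_le (N M : Int) : ∀ (cs : List (Int × Int)) (a : List (List Int)),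
    pvCost N M cs a + 1 ≤ 2 ^ cs.length := by
  intro cs
  induction cs with
  | nil => intro a; simp [pvCost]
  | cons hd cs2 ih =>
    obtain ⟨x, y⟩ := hd
    intro a
    have h1 := ih (pvDecAll a x y N M)
    have h2 := ih a
    rw [pvCost]
    cases hcan : pvCan a x y N M with
    | true =>
      cases hsub : pvSubT N M cs2 (pvDecAll a x y N M) with
      | true => simp only [if_true, hsub, List.length_cons, pow_succ]; omega
      | false => simp only [if_true, hsub, List.length_cons, pow_succ, Bool.false_eq_true,
          if_false]; omega
    | false => simp only [Bool.false_eq_true, if_false, List.length_cons, pow_succ]; omega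

theorem pvAlt_eq_subT (grid : List (List String)) (arr : List (List Int))
    (visited : List (List Bool)) (N M : Int) :
    SolveBackTrackMinesweeper_alt grid arr visited N M =
      pvSubT N M (pvCellsB visited N M) (pvCopyB arr N M) := by
  rw [SolveBackTrackMinesweeper_alt]
  have hb := pvCost_le N M (pvCellsB visited N M) (pvCopyB arr N M)
  have harith : 2 ^ (pvCellsB visited N M).length + 1 =
      pvCost N M (pvCellsB visited N M) (pvCopyB arr N M) +
        (2 ^ (pvCellsB visited N M).length - pvCost N M (pvCellsB visited N M)
          (pvCopyB arr N M)) + 1 := by omega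
  rw [harith, pvLoopB_eq N M (pvCellsB visited N M) (pvCellsB visited N M) 0 _ [] _ rfl]
  cases h : pvSubT N M (pvCellsB visited N M) (pvCopyB arr N M) <;> simp [h]

-- ===== the truncated copy computes the same tree as the full matrix =====
def pvRel (N M : Int) (a aT : List (List Int)) : Prop :=
  aT.length = N.toNat ∧ (∀ i, i < N.toNat → (natRow aT i).length = M.toNat) ∧
  N.toNat ≤ a.length ∧ (∀ i, i < N.toNat → M.toNat ≤ (natRow a i).length) ∧
  (∀ i j, i < N.toNat → j < M.toNat → natGet2 a i j = natGet2 aT i j)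

theorem pvRel_get (N M : Int) (a aT : List (List Int)) (h : pvRel N M a aT)
    (x y : Int) (hx : 0 ≤ x) (hxN : x < N) (hy : 0 ≤ y) (hyM : y < M) :
    pvGet2I a x y = pvGet2I aT x y := by
  rw [pvGet2I_nonneg _ _ _ hx hy, pvGet2I_nonneg _ _ _ hx hy]
  exact h.2.2.2.2 x.toNat y.toNat (by omega) (by omega)

theorem pvRel_add (N M : Int) (a aT : List (List Int)) (h : pvRel N M a aT)
    (x y d : Int) (hx : 0 ≤ x) (hxN : x < N) (hy : 0 ≤ y) (hyM : y < M) :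
    pvRel N M (pvAdd2 a x y d) (pvAdd2 aT x y d) := by
  obtain ⟨h1, h2, h3, h4, h5⟩ := h
  rw [pvAdd2_nonneg _ _ _ _ hx hy, pvAdd2_nonneg _ _ _ _ hx hy]
  refine ⟨by rw [natAdd2_length]; exact h1,
    fun i hi => by rw [natAdd2_rowlen]; exact h2 i hi,
    by rw [natAdd2_length]; exact h3,
    fun i hi => by rw [natAdd2_rowlen]; exact h4 i hi,
    ?_⟩
  intro i j hi hj
  by_cases hij : i = x.toNat ∧ j = y.toNat
  · obtain ⟨rfl, rfl⟩ := hij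
    rw [natGet2_add2_self a x.toNat y.toNat d (by omega) (by have := h4 x.toNat hi; omega),
      natGet2_add2_self aT x.toNat y.toNat d (by omega) (by have := h2 x.toNat hi; omega),
      h5 _ _ hi hj]
  · rw [natGet2_add2_ne a _ _ _ _ d hij, natGet2_add2_ne aT _ _ _ _ d hij]
    exact h5 i j hi hj

theorem pvRel_decAll (N M : Int) (a aT : List (List Int)) (h : pvRel N M a aT) (x y : Int) :
    pvRel N M (pvDecAll a x y N M) (pvDecAll aT x y N M) := by
  rw [pvDecAll, pvDecAll]
  have : ∀ (L : List (Int × Int)), (∀ p ∈ L, 0 ≤ p.1 ∧ p.1 < N ∧ 0 ≤ p.2 ∧ p.2 < M) →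
      ∀ a aT, pvRel N M a aT →
      pvRel N M (L.foldl (fun acc p => pvAdd2 acc p.1 p.2 (-1)) a)
        (L.foldl (fun acc p => pvAdd2 acc p.1 p.2 (-1)) aT) := by
    intro L
    induction L with
    | nil => intro _ a aT h; exact h
    | cons p t ihL =>
      intro hmem a aT h
      have hp := hmem p List.mem_cons_self
      exact ihL (fun q hq => hmem q (List.mem_cons_of_mem _ hq)) _ _
        (pvRel_add N M a aT h p.1 p.2 (-1) hp.1 hp.2.1 hp.2.2.1 hp.2.2.2)
  exact this (pvNbB x y N M) (fun p hp => pvMemNb x y N M p hp) a aT h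

theorem pvRel_can (N M : Int) (a aT : List (List Int)) (h : pvRel N M a aT) (x y : Int) :
    pvCan a x y N M = pvCan aT x y N M := by
  rw [pvCan, pvCan, Bool.eq_iff_iff, List.all_eq_true, List.all_eq_true]
  constructor <;> intro H p hp <;> have hw := pvMemNb x y N M p hp <;>
    have := pvRel_get N M a aT h p.1 p.2 hw.1 hw.2.1 hw.2.2.1 hw.2.2.2
  · rw [← this]; exact H p hp
  · rw [this]; exact H p hp

theorem pvRel_allZero (N M : Int) (a aT : List (List Int)) (h : pvRel N M a aT) :
    pvAllZero a N M = pvAllZeroList aT := by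
  obtain ⟨h1, h2, h3, h4, h5⟩ := h
  rw [Bool.eq_iff_iff, pvAllZero, pvAllZeroList]
  simp only [List.all_eq_true, PySem.List.mem_pyRange_one, decide_eq_true_eq]
  constructor
  · intro H row hrow z hz
    obtain ⟨i, hi, rfl⟩ := List.mem_iff_getElem.mp hrow
    obtain ⟨j, hj, rfl⟩ := List.mem_iff_getElem.mp hz
    have hiN : i < N.toNat := by omega
    have hrowlen : (natRow aT i).length = M.toNat := h2 i hiN
    have hrowi : natRow aT i = aT[i] := by simp [natRow, List.getElem?_eq_getElem hi]
    have hjM : j < M.toNat := by rw [← hrowlen, hrowi]; exact hj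
    have := H (i : Int) ⟨by omega, by omega⟩ (j : Int) ⟨by omega, by omega⟩
    rw [pvGet2I_nonneg _ _ _ (by omega) (by omega), Int.toNat_natCast, Int.toNat_natCast,
      h5 i j hiN hjM] at this
    rw [natGet2, hrowi, List.getElem?_eq_getElem hj] at this
    simpa using this
  · intro H x hx y hy
    have hxN : x.toNat < N.toNat := by omega
    have hyM : y.toNat < M.toNat := by omega
    rw [pvGet2I_nonneg _ _ _ hx.1 hy.1, h5 _ _ hxN hyM]
    have hxl : x.toNat < aT.length := by omega
    have hrowi : natRow aT x.toNat = aT[x.toNat] := by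
      simp [natRow, List.getElem?_eq_getElem hxl]
    have hyl : y.toNat < aT[x.toNat].length := by
      have := h2 x.toNat hxN; rw [hrowi] at this; omega
    rw [natGet2, hrowi, List.getElem?_eq_getElem hyl, Option.getD_some]
    exact H aT[x.toNat] (List.getElem_mem hxl) _ (List.getElem_mem hyl)

theorem pvRel_sub (N M : Int) : ∀ (cs : List (Int × Int)) (a aT : List (List Int)),
    pvRel N M a aT → (∀ p ∈ cs, 0 ≤ p.1 ∧ p.1 < N ∧ 0 ≤ p.2 ∧ p.2 < M) →
    pvSubT N M cs aT = pvSub N M cs a := by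
  intro cs
  induction cs with
  | nil => intro a aT h _; rw [pvSubT, pvSub, pvRel_allZero N M a aT h]
  | cons hd cs2 ih =>
    obtain ⟨x, y⟩ := hd
    intro a aT h hmem
    have hmem2 : ∀ p ∈ cs2, 0 ≤ p.1 ∧ p.1 < N ∧ 0 ≤ p.2 ∧ p.2 < M :=
      fun p hp => hmem p (List.mem_cons_of_mem _ hp)
    rw [pvSubT, pvSub, pvRel_can N M a aT h x y]
    cases hcan : pvCan aT x y N M with
    | true =>
      simp only [if_true]
      rw [ih _ _ (pvRel_decAll N M a aT h x y) hmem2, ih _ _ h hmem2]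
    | false =>
      simp only [Bool.false_eq_true, if_false]
      exact ih _ _ h hmem2

-- the copy satisfies pvRel under the shape precondition
theorem pvRel_copy (arr : List (List Int)) (N M : Int) (hN : 0 < N) (hM : 0 < M)
    (hlen : N.toNat ≤ arr.length) (hrows : ∀ r ∈ arr.take N.toNat, M.toNat ≤ r.length) :
    pvRel N M arr (pvCopyB arr N M) := by
  have hcopy : pvCopyB arr N M = (arr.take N.toNat).map (fun r => r.take M.toNat) := by
    rw [pvCopyB, show max N 0 = N from by omega, show max M 0 = M from by omega,
      PySem.List.slice_to _ (by omega)]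
    exact List.map_congr_left (fun r hr => PySem.List.slice_to _ (by omega))
  rw [hcopy]
  have hlenT : ((arr.take N.toNat).map (fun r => r.take M.toNat)).length = N.toNat := by
    rw [List.length_map, List.length_take]; omega
  have hrowA : ∀ i, (hi : i < N.toNat) → natRow arr i = arr[i]'(by omega) := by
    intro i hi
    rw [natRow, List.getElem?_eq_getElem (by omega : i < arr.length), Option.getD_some]
  have hrowlenA : ∀ i, (hi : i < N.toNat) → M.toNat ≤ (arr[i]'(by omega : i < arr.length)).length := by
    intro i hi
    refine hrows _ (List.mem_iff_getElem.mpr ⟨i, by rw [List.length_take]; omega, ?_⟩)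
    exact List.getElem_take
  have hrowT : ∀ i, (hi : i < N.toNat) →
      natRow ((arr.take N.toNat).map (fun r => r.take M.toNat)) i =
        (arr[i]'(by omega : i < arr.length)).take M.toNat := by
    intro i hi
    rw [natRow, List.getElem?_map, List.getElem?_take_of_lt hi,
      List.getElem?_eq_getElem (by omega : i < arr.length), Option.map_some, Option.getD_some]
  refine ⟨hlenT, fun i hi => ?_, hlen, fun i hi => ?_, fun i j hi hj => ?_⟩
  · rw [hrowT i hi, List.length_take]
    have := hrowlenA i hi
    omega
  · rw [hrowA i hi]
    exact hrowlenA i hi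
  · have hjl : j < (arr[i]'(by omega : i < arr.length)).length := by
      have := hrowlenA i hi; omega
    have hjt : j < ((arr[i]'(by omega : i < arr.length)).take M.toNat).length := by
      rw [List.length_take]; omega
    rw [natGet2, natGet2, hrowA i hi, hrowT i hi, List.getElem?_eq_getElem hjl,
      List.getElem?_eq_getElem hjt, Option.getD_some, Option.getD_some, List.getElem_take]

-- ===== degenerate boards and the final assembly =====
theorem pvCellsTrivial (v : List (List Bool)) (N M : Int) (h : N ≤ 0 ∨ M ≤ 0) :
    pvCellsB v N M = [] := by
  rcases h with h | h
  · have hn : PySem.List.pyRange 0 N 1 = [] := PySem.List.pyRange_one_eq_nil (by omega)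
    rw [pvCellsB, hn]; rfl
  · have hm : PySem.List.pyRange 0 M 1 = [] := PySem.List.pyRange_one_eq_nil (by omega)
    rw [pvCellsB, hm]
    simp

theorem pvAllZeroTrivial (a : List (List Int)) (N M : Int) (h : N ≤ 0 ∨ M ≤ 0) :
    pvAllZero a N M = true := by
  rcases h with h | h
  · have hn : PySem.List.pyRange 0 N 1 = [] := PySem.List.pyRange_one_eq_nil (by omega)
    rw [pvAllZero, hn]; rfl
  · have hm : PySem.List.pyRange 0 M 1 = [] := PySem.List.pyRange_one_eq_nil (by omega)
    rw [pvAllZero, hm]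
    simp

theorem pvAllZeroListTrivial (arr : List (List Int)) (N M : Int) (h : N ≤ 0 ∨ M ≤ 0) :
    pvAllZeroList (pvCopyB arr N M) = true := by
  rcases h with h | h
  · rw [pvCopyB, show max N 0 = 0 from by omega, PySem.List.slice_to _ (by omega)]
    simp [pvAllZeroList]
  · rw [pvCopyB, show max M 0 = 0 from by omega]
    rw [pvAllZeroList]
    simp only [List.all_map, List.all_eq_true]
    intro r hr
    show (PySem.List.slice r none (some 0)).all (fun z => decide (z = 0)) = true
    rw [PySem.List.slice_to r (by omega : (0:Int) ≤ 0)]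
    simp

theorem pvCellsLen (v : List (List Bool)) (N M : Int) :
    (pvCellsB v N M).length ≤ N.toNat * M.toNat := by
  rw [pvCellsB, List.length_flatMap]
  have h1 : ∀ x ∈ (PySem.List.pyRange 0 N 1).map (fun x =>
      (((PySem.List.pyRange 0 M 1).filter (fun y => !pvGet2B v x y)).map
        (fun y => (x, y))).length), x ≤ M.toNat := by
    intro x hx
    obtain ⟨c, _, rfl⟩ := List.mem_map.mp hx
    calc (((PySem.List.pyRange 0 M 1).filter (fun y => !pvGet2B v c y)).map
          (fun y => (c, y))).length
        = ((PySem.List.pyRange 0 M 1).filter (fun y => !pvGet2B v c y)).length :=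
          List.length_map ..
      _ ≤ (PySem.List.pyRange 0 M 1).length := List.length_filter_le _ _
      _ = M.toNat := by rw [PySem.List.length_pyRange_one]; simp
  calc ((PySem.List.pyRange 0 N 1).map _).sum
      ≤ ((PySem.List.pyRange 0 N 1).map (fun x =>
          (((PySem.List.pyRange 0 M 1).filter (fun y => !pvGet2B v x y)).map
            (fun y => (x, y))).length)).length • M.toNat := List.sum_le_card_nsmul _ _ h1
    _ = N.toNat * M.toNat := by
        rw [List.length_map, PySem.List.length_pyRange_one, smul_eq_mul]
        simp

theorem pvMainEq (grid : List (List String)) (arr : List (List Int))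
    (visited : List (List Bool)) (N M : Int)
    (hpre : Pre_SolveBackTrackMinesweeper grid arr visited N M) :
    SolveBackTrackMinesweeper grid arr visited N M =
      SolveBackTrackMinesweeper_alt grid arr visited N M := by
  unfold Pre_SolveBackTrackMinesweeper at hpre
  rw [pvAlt_eq_subT]
  by_cases hNM : N ≤ 0 ∨ M ≤ 0
  · have hcells := pvCellsTrivial visited N M hNM
    rw [SolveBackTrackMinesweeper,
      (pvSolveA_eq N M [] (N.toNat * M.toNat + 1) grid arr visited hcells (by simp)).1,
      hcells, pvSub, pvSubT, pvAllZeroTrivial arr N M hNM, pvAllZeroListTrivial arr N M hNM]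
  · have hN : 0 < N := by omega
    have hM : 0 < M := by omega
    have hshape := hpre.resolve_left (by omega) |>.resolve_left (by omega)
    have hrel := pvRel_copy arr N M hN hM hshape.2.1 hshape.2.2.2.2.1
    have hlen : (pvCellsB visited N M).length < N.toNat * M.toNat + 1 := by
      have := pvCellsLen visited N M; omega
    rw [SolveBackTrackMinesweeper,
      (pvSolveA_eq N M (pvCellsB visited N M) (N.toNat * M.toNat + 1) grid arr visited
        rfl hlen).1,
      pvRel_sub N M (pvCellsB visited N M) arr (pvCopyB arr N M) hrel
        (fun p hp => by
          obtain ⟨h1, h2, h3, h4, _⟩ := (pvMemCells visited N M p).mp hp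
          exact ⟨h1, h2, h3, h4⟩)]

-- ===== VERDICT (by name: the statement is the Claim_ definition above) =====
theorem SolveBackTrackMinesweeper_spec : Claim_equal_SolveBackTrackMinesweeper := by
  intro grid arr visited N M _ hpre
  unfold Spec_SolveBackTrackMinesweeper
  exact pvMainEq grid arr visited N M hpre
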